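-- pv_equiv track=rewrite | github.com/DhruvArvindSingh/SIH | apps/fast-server/detection_code/garbage_detection.py | get_simple_priority
-- ===== SOURCE A (Python) =====
-- def get_simple_priority(detection_details):
--     """
--     Enhanced priority logic based on size and quantity.
--     """
--     if not detection_details:
--         return 'low'
--
--     low_count = sum(1 for d in detection_details if d['size_category'] == 'low')
--     medium_count = sum(1 for d in detection_details if d['size_category'] == 'medium')
--     high_count = sum(1 for d in detection_details if d['size_category'] == 'high')
--
--     if high_count > 0:
--         return 'high'
--     if medium_count >= 2:
--         return 'high'
--     if low_count > 2:
--         return 'medium'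
--     if medium_count > 0:
--         return 'medium'
--     return 'low'
-- ===== SOURCE B (Python) =====
-- _FINAL = [['low', 'low', 'low', 'medium'],
--           ['medium', 'medium', 'medium', 'medium']]
--
--
-- def get_simple_priority(detection_details):
--     """
--     Enhanced priority logic based on size and quantity.
--     Early-exit streaming scan: returns 'high' the moment it is decided
--     (any 'high', or a second 'medium'); otherwise tracks only a
--     one-bit medium flag and a low counter saturated at 3, and reads
--     the final answer from a table instead of a threshold cascade.
--     """
--     m = l = 0
--     for d in detection_details:
--         c = d['size_category']
--         if c == 'high':
--             return 'high'
--         if c == 'medium':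
--             if m:
--                 return 'high'
--             m = 1
--         elif c == 'low' and l < 3:
--             l += 1
--     return _FINAL[m][l]
-- ===== Notes on version B (the rewrite author's own statement) =====
-- stated objective: alternative
-- what changed: Replaces A's three full-list count scans plus threshold cascade by an early-exit finite-state scan (returns 'high' mid-stream on any 'high' or a second 'medium') over a saturated state (one-bit medium flag, low counter capped at 3) whose final answer is a table lookup, with no threshold comparisons.
import Mathlib
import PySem

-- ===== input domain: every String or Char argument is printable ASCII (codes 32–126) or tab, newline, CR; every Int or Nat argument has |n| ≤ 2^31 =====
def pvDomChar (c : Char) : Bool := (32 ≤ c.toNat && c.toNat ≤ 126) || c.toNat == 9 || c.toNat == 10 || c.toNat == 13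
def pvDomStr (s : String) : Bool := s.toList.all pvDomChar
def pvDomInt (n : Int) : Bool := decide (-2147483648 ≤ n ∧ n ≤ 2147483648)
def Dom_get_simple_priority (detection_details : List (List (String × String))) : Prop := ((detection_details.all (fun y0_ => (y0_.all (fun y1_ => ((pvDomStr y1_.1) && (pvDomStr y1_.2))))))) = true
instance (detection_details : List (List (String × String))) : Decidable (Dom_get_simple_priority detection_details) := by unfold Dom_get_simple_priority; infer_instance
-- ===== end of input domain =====

-- B replaces A's three full count scans + threshold cascade with an early-exit saturating
-- finite-state scan and a final table lookup (alternative decomposition, same cost).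


-- d['size_category']: first-match lookup in the association list (Python dict access)
def lookupSC (d : List (String × String)) : Option String :=
  (d.find? (fun p => p.1 == "size_category")).map (·.2)

-- ===== PORT A =====
-- A: guard on empty, then three independent 0/1-sum scans, then the threshold cascade.
def get_simple_priority (detection_details : List (List (String × String))) : String :=
  if detection_details = [] then "low"
  else
    let low_count := detection_details.foldl
      (fun n d => if (lookupSC d).getD "" = "low" then n + 1 else n) (0 : Int)
    let medium_count := detection_details.foldl
      (fun n d => if (lookupSC d).getD "" = "medium" then n + 1 else n) (0 : Int)
    let high_count := detection_details.foldl
      (fun n d => if (lookupSC d).getD "" = "high" then n + 1 else n) (0 : Int)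
    if high_count > 0 then "high"
    else if medium_count ≥ 2 then "high"
    else if low_count > 2 then "medium"
    else if medium_count > 0 then "medium"
    else "low"

-- ===== PORT B =====
-- B's _FINAL table
def finalTable : List (List String) :=
  [["low", "low", "low", "medium"], ["medium", "medium", "medium", "medium"]]

-- B's for-loop with its two early returns, as structural recursion over the list,
-- threading the (m, l) state; the final _FINAL[m][l] indexing is ported with
-- pyGet? (indices are provably in range on every reachable state).
def altLoop (xs : List (List (String × String))) (m l : Int) : String :=
  match xs with
  | [] => ((PySem.List.pyGet? finalTable m).getD []) |> (fun row => (PySem.List.pyGet? row l).getD "")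
  | d :: rest =>
    let c := (lookupSC d).getD ""
    if c = "high" then "high"
    else if c = "medium" then
      (if m ≠ 0 then "high" else altLoop rest 1 l)
    else if c = "low" ∧ l < 3 then altLoop rest m (l + 1)
    else altLoop rest m l

def get_simple_priority_alt (detection_details : List (List (String × String))) : String :=
  altLoop detection_details 0 0

-- ===== PRECONDITION & SPEC =====
-- Pre_ excludes inputs where some dict lacks the 'size_category' key, on which A raises KeyError.
def Pre_get_simple_priority (detection_details : List (List (String × String))) : Prop :=
  ∀ d ∈ detection_details, (lookupSC d).isSome = true
instance (detection_details : List (List (String × String))) : Decidable (Pre_get_simple_priority detection_details) := by unfold Pre_get_simple_priority; infer_instance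
def pvWitness_get_simple_priority : (List (List (String × String))) :=
  [[("size_category", "medium")], [("size_category", "low")]]

def Spec_get_simple_priority (detection_details : List (List (String × String))) (out : String) : Prop := out = get_simple_priority_alt detection_details
instance (detection_details : List (List (String × String))) (out : String) : Decidable (Spec_get_simple_priority detection_details out) := by unfold Spec_get_simple_priority; infer_instance

-- ===== CLAIM (what is proved, stated in full; the proofs are below) =====
def Claim_equal_get_simple_priority : Prop := ∀ (detection_details : List (List (String × String))), Dom_get_simple_priority detection_details → Pre_get_simple_priority detection_details → Spec_get_simple_priority detection_details (get_simple_priority detection_details)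

-- ===== LEMMAS AND PROOFS =====

-- category count, recursively (characterises A's foldl scans)
def cnt (cat : String) : List (List (String × String)) → Int
  | [] => 0
  | d :: rest => (if (lookupSC d).getD "" = cat then 1 else 0) + cnt cat rest

lemma cnt_nonneg (cat : String) (xs : List (List (String × String))) : 0 ≤ cnt cat xs := by
  induction xs with
  | nil => simp [cnt]
  | cons d rest ih => simp only [cnt]; split <;> omega

lemma foldl_cnt (cat : String) (xs : List (List (String × String))) (n : Int) :
    xs.foldl (fun n d => if (lookupSC d).getD "" = cat then n + 1 else n) n = n + cnt cat xs := by
  induction xs generalizing n with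
  | nil => simp [cnt]
  | cons d rest ih => simp only [List.foldl_cons, cnt, ih]; split <;> omega

-- invariant: B's early-exit saturating scan equals A's cascade over the full counts
lemma altLoop_eq (xs : List (List (String × String))) (m l : Int)
    (hm0 : 0 ≤ m) (hm1 : m ≤ 1) (hl0 : 0 ≤ l) (hl1 : l ≤ 3) :
    altLoop xs m l =
      (if 0 < cnt "high" xs then "high"
       else if 2 ≤ m + cnt "medium" xs then "high"
       else if 2 < l + cnt "low" xs then "medium"
       else if 0 < m + cnt "medium" xs then "medium"
       else "low") := by
  induction xs generalizing m l with
  | nil =>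
      have hm : m = 0 ∨ m = 1 := by omega
      have hl : l = 0 ∨ l = 1 ∨ l = 2 ∨ l = 3 := by omega
      rcases hm with rfl | rfl <;> rcases hl with rfl | rfl | rfl | rfl <;> decide
  | cons d rest ih =>
      have hh := cnt_nonneg "high" rest
      have hmc := cnt_nonneg "medium" rest
      have hlo := cnt_nonneg "low" rest
      simp only [altLoop, cnt]
      by_cases h1 : (lookupSC d).getD "" = "high"
      · simp only [h1, reduceIte]
        split_ifs <;> first | rfl | omega
      · by_cases h2 : (lookupSC d).getD "" = "medium"
        · simp only [h2, reduceIte, String.reduceEq, false_and, if_false]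
          by_cases hmz : m = 0
          · subst hmz
            rw [if_neg (by omega), ih 1 l (by omega) (by omega) hl0 hl1]
            split_ifs <;> first | rfl | omega
          · rw [if_pos hmz]
            split_ifs <;> first | rfl | omega
        · by_cases h3 : (lookupSC d).getD "" = "low"
          · simp only [h3, reduceIte, String.reduceEq, true_and, if_false]
            by_cases hls : l < 3
            · rw [if_pos hls, ih m (l + 1) hm0 hm1 (by omega) (by omega)]
              split_ifs <;> first | rfl | omega
            · rw [if_neg hls, ih m l hm0 hm1 hl0 hl1]
              split_ifs <;> first | rfl | omega
          · simp only [if_neg h1, if_neg h2, if_neg h3,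
              if_neg (fun h : _ ∧ _ => h3 h.1), ih m l hm0 hm1 hl0 hl1]
            split_ifs <;> first | rfl | omega

-- ===== VERDICT (by name: the statement is the Claim_ definition above) =====
theorem get_simple_priority_spec : Claim_equal_get_simple_priority := by
  intro xs _ _
  unfold Spec_get_simple_priority get_simple_priority get_simple_priority_alt
  rw [altLoop_eq xs 0 0 (by omega) (by omega) (by omega) (by omega)]
  cases xs with
  | nil => decide
  | cons d rest =>
      rw [if_neg (List.cons_ne_nil d rest)]
      simp only [foldl_cnt]
      split_ifs <;> first | rfl | omega
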